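-- pv_equiv track=rewrite | github.com/zacharykcc/Westshore-Computer-Science-Club-22-23 | PenniesAddUp/gpt.py | calculate_word_value
-- ===== SOURCE A (Python) =====
-- def calculate_word_value(word, value_of_a):
--     total_value = 0
--     for letter in word:
--         letter_value = ord(letter) - ord('A') + value_of_a
--         if letter_value > 26:
--             letter_value -= 26
--         total_value += letter_value
--     return total_value
-- ===== SOURCE B (Python) =====
-- def calculate_word_value(word, value_of_a):
--     total = sum(ord(c) for c in word) + len(word) * (value_of_a - 65)
--     overflow = sum(1 for c in word if ord(c) - 65 + value_of_a > 26)
--     return total - 26 * overflow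
-- ===== Notes on version B (the rewrite author's own statement) =====
-- stated objective: alternative
-- what changed: Replaces the per-letter branch-and-accumulate loop with an algebraic total (sum of ords plus a length term) minus a 26-per-overflowing-letter correction computed by a separate count.
import Mathlib
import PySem

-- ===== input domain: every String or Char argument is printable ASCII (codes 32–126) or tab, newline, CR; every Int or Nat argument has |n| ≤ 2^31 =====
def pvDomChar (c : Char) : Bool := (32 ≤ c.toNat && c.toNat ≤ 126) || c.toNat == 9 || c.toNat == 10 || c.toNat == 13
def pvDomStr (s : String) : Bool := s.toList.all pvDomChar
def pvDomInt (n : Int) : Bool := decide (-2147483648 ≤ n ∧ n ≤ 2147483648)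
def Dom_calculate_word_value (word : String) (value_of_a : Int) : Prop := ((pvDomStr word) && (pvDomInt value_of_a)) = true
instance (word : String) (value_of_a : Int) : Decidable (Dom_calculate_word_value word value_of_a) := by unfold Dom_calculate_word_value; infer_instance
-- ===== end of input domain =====

-- ===== PORT A =====
-- Port of A: one fold over the letters, branch-and-accumulate.
def calculate_word_value (word : String) (value_of_a : Int) : Int :=
  word.toList.foldl
    (fun total_value letter =>
      let letter_value : Int := (letter.toNat : Int) - 65 + value_of_a
      let letter_value := if letter_value > 26 then letter_value - 26 else letter_value
      total_value + letter_value)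
    0

-- ===== PORT B =====
-- Port of B: algebraic total plus overflow-count correction (alternative decomposition, same cost).
def calculate_word_value_alt (word : String) (value_of_a : Int) : Int :=
  let cs := word.toList
  let total : Int := (cs.map (fun c => (c.toNat : Int))).sum + (cs.length : Int) * (value_of_a - 65)
  let overflow : Int := ((cs.filter (fun c => decide ((c.toNat : Int) - 65 + value_of_a > 26))).length : Int)
  total - 26 * overflow

-- ===== PRECONDITION & SPEC =====
def Spec_calculate_word_value (word : String) (value_of_a : Int) (out : Int) : Prop := out = calculate_word_value_alt word value_of_a
instance (word : String) (value_of_a : Int) (out : Int) : Decidable (Spec_calculate_word_value word value_of_a out) := by unfold Spec_calculate_word_value; infer_instance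

-- ===== CLAIM (what is proved, stated in full; the proofs are below) =====
def Claim_equal_calculate_word_value : Prop := ∀ (word : String) (value_of_a : Int), Dom_calculate_word_value word value_of_a → Spec_calculate_word_value word value_of_a (calculate_word_value word value_of_a)

-- ===== LEMMAS AND PROOFS =====

-- ===== VERDICT (by name: the statement is the Claim_ definition above) =====
theorem cwv_foldl (v : Int) (cs : List Char) (acc : Int) :
    cs.foldl
      (fun total_value letter =>
        let letter_value : Int := (letter.toNat : Int) - 65 + v
        let letter_value := if letter_value > 26 then letter_value - 26 else letter_value
        total_value + letter_value)
      acc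
    = acc + (cs.map (fun c => (c.toNat : Int))).sum + (cs.length : Int) * (v - 65)
        - 26 * ((cs.filter (fun c => decide ((c.toNat : Int) - 65 + v > 26))).length : Int) := by
  induction cs generalizing acc with
  | nil => simp
  | cons c cs ih =>
    simp only [List.foldl_cons, List.map_cons, List.sum_cons, List.length_cons, List.filter_cons, ih]
    by_cases h : (c.toNat : Int) - 65 + v > 26 <;> simp [h] <;> ring

theorem calculate_word_value_spec : Claim_equal_calculate_word_value := by
  intro word v _
  unfold Spec_calculate_word_value calculate_word_value calculate_word_value_alt
  rw [cwv_foldl]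
  ring
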